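-- pv_equiv track=rewrite | github.com/yang-su2000/CP-Practice | archived/2022-10/826d.py | dfs
-- ===== SOURCE A (Python) =====
-- def dfs(ls, l, r):
--     if l + 1 == r:
--         if ls[l] < ls[r]:
--             return 0, ls[l], ls[r]
--         else:
--             return 1, ls[r], ls[l]
--     mid = (l + r) // 2
--     ans1, lo1, hi1 = dfs(ls, l, mid)
--     ans2, lo2, hi2 = dfs(ls, mid+1, r)
--     if ans1 == -1 or ans2 == -1:
--         return -1, -1, -1
--     if hi1 < hi2:
--         if hi1 + 1 == lo2:
--             return ans1 + ans2, lo1, hi2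
--         return -1, -1, -1
--     else:
--         if hi2 + 1 == lo1:
--             return 1 + ans1 + ans2, lo2, hi1
--         return -1, -1, -1
-- ===== SOURCE B (Python) =====
-- def dfs(ls, l, r):
--     # Iterative post-order traversal of the same mid-split tree with an explicit
--     # work stack and a results stack (return value only; no recursion).
--     work = [("task", l, r)]
--     res = []
--     while work:
--         item = work.pop()
--         if item[0] == "task":
--             _, a, b = item
--             if a + 1 == b:
--                 x, y = ls[a], ls[b]
--                 res.append((0, x, y) if x < y else (1, y, x))
--             elif a < b:
--                 m = (a + b) // 2
--                 work.append(("combine",))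
--                 work.append(("task", m + 1, b))
--                 work.append(("task", a, m))
--             else:
--                 # degenerate segment: only reachable when r-l+1 is not a power of
--                 # two (A recurses past the recursion limit there); bail out
--                 raise ValueError("segment length must be a power of two")
--         else:
--             c2, lo2, hi2 = res.pop()
--             c1, lo1, hi1 = res.pop()
--             if c1 == -1 or c2 == -1:
--                 res.append((-1, -1, -1))
--             elif hi1 < hi2:
--                 res.append((c1 + c2, lo1, hi2) if hi1 + 1 == lo2 else (-1, -1, -1))
--             else:
--                 res.append((1 + c1 + c2, lo2, hi1) if hi2 + 1 == lo1 else (-1, -1, -1))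
--     return res[-1]
-- ===== Notes on version B (the rewrite author's own statement) =====
-- stated objective: alternative
-- what changed: The native recursion over mid-split segments is replaced by an iterative post-order traversal: an explicit work stack of task/combine items and a results stack, combining the two child results when a combine item is popped.
import Mathlib
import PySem

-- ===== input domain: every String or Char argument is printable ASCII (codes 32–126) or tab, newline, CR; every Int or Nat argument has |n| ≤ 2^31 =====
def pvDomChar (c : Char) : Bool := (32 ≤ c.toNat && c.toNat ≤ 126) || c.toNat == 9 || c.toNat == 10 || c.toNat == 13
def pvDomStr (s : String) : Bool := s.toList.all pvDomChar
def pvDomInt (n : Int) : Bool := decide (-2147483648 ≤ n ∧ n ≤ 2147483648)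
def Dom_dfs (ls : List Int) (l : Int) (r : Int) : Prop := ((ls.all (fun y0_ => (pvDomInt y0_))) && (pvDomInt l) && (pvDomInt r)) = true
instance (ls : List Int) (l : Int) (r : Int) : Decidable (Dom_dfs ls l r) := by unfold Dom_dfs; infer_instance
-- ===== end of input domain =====

-- B replaces A's native recursion by an iterative post-order traversal with an explicit
-- work stack and results stack (objective: alternative decomposition, same asymptotic cost).


-- ===== PORT A =====
-- Python A raises on some inputs: IndexError when a leaf index l/r is out of range, and
-- RecursionError (at CPython's recursion limit) when the mid-split recursion reaches an
-- l = r segment and descends forever. The port models a raise by Option.none, propagated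
-- left-to-right exactly as Python unwinds the recursion, with a depth fuel standing for
-- the recursion limit (on Dom inputs the recursion that returns has depth ≤ 33 < 64).
def dfsAux (ls : List Int) : Nat → Int → Int → Option (Int × Int × Int)
  | 0, _, _ => none                    -- recursion limit hit: Python raises RecursionError
  | fuel+1, l, r =>
    if l + 1 = r then
      match PySem.List.pyGet? ls l, PySem.List.pyGet? ls r with   -- ls[l], ls[r]
      | some x, some y => some (if x < y then (0, x, y) else (1, y, x))
      | _, _ => none                   -- IndexError
    else
      let mid := PySem.Int.floordiv (l + r) 2
      match dfsAux ls fuel l mid with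
      | none => none                   -- exception propagates, right child never runs
      | some p1 =>
        match dfsAux ls fuel (mid+1) r with
        | none => none
        | some p2 =>
          some (if p1.1 = -1 ∨ p2.1 = -1 then (-1, -1, -1)
                else if p1.2.2 < p2.2.2 then
                  (if p1.2.2 + 1 = p2.2.1 then (p1.1 + p2.1, p1.2.1, p2.2.2) else (-1, -1, -1))
                else
                  (if p2.2.2 + 1 = p1.2.1 then (1 + p1.1 + p2.1, p2.2.1, p1.2.2) else (-1, -1, -1)))

def dfs (ls : List Int) (l : Int) (r : Int) : Int × Int × Int :=
  (dfsAux ls 64 l r).getD (-1, -1, -1)   -- none (= Python raises) only outside Pre_dfs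

-- ===== PORT B =====
inductive PVItem where
  | task : Int → Int → PVItem
  | combine : PVItem
deriving DecidableEq, Repr

-- B's combine step (the else-branch of the while loop in Source B)
def pvCombine (p1 p2 : Int × Int × Int) : Int × Int × Int :=
  if p1.1 = -1 ∨ p2.1 = -1 then (-1, -1, -1)
  else if p1.2.2 < p2.2.2 then
    (if p1.2.2 + 1 = p2.2.1 then (p1.1 + p2.1, p1.2.1, p2.2.2) else (-1, -1, -1))
  else
    (if p2.2.2 + 1 = p1.2.1 then (1 + p1.1 + p2.1, p2.2.1, p1.2.2) else (-1, -1, -1))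

def pvWeight : PVItem → Nat
  | .task l r => 3 * (r - l).toNat
  | .combine => 1

-- termination measure lemmas for pvRun (cited by name in decreasing_by)
theorem pvDec_leaf (l r : Int) (h : l + 1 = r) (K : List PVItem) :
    (K.map pvWeight).sum < ((PVItem.task l r :: K).map pvWeight).sum := by
  simp [pvWeight]; omega

theorem pvDec_split (l r : Int) (h2 : l < r) (K : List PVItem) :
    ((PVItem.task l (PySem.Int.floordiv (l + r) 2) ::
      PVItem.task (PySem.Int.floordiv (l + r) 2 + 1) r :: PVItem.combine :: K).map pvWeight).sum <
    ((PVItem.task l r :: K).map pvWeight).sum := by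
  have hb := PySem.Int.floordiv_two_mid_bounds (le_of_lt h2)
  have hlt : PySem.Int.floordiv (l + r) 2 < r :=
    (PySem.Int.floordiv_lt_iff_lt_mul (by omega)).mpr (by omega)
  simp only [List.map_cons, List.sum_cons, pvWeight]
  generalize PySem.Int.floordiv (l + r) 2 = m at hb hlt
  obtain ⟨hml, -⟩ := hb
  have e : r - l = (m - l) + ((r - (m + 1)) + 1) := by ring
  rw [e, Int.toNat_add (by omega) (by omega), Int.toNat_add (by omega) (by omega),
    Int.toNat_one]
  generalize (m - l).toNat = a
  generalize (r - (m + 1)).toNat = b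
  generalize (List.map pvWeight K).sum = s
  omega

theorem pvDec_combine (K : List PVItem) :
    (K.map pvWeight).sum < ((PVItem.combine :: K).map pvWeight).sum := by
  simp [pvWeight]

-- the while loop of Source B: work stack (head = top) and results stack (head = top)
def pvRun (ls : List Int) : List PVItem → List (Int × Int × Int) → Int × Int × Int
  | [], res => res.headD (-1, -1, -1)   -- res[-1]; res is nonempty whenever the loop is reached from dfs_alt
  | PVItem.task l r :: K, res =>
    if h : l + 1 = r then
      let x := (PySem.List.pyGet? ls l).getD 0
      let y := (PySem.List.pyGet? ls r).getD 0
      pvRun ls K ((if x < y then (0, x, y) else (1, y, x)) :: res)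
    else if hlt : l < r then
      let m := PySem.Int.floordiv (l + r) 2
      pvRun ls (PVItem.task l m :: PVItem.task (m+1) r :: PVItem.combine :: K) res
    else (-1, -1, -1)   -- Source B raises ValueError here (degenerate segment, outside Pre_dfs)
  | PVItem.combine :: K, res =>
    match res with
    | p2 :: p1 :: rest => pvRun ls K (pvCombine p1 p2 :: rest)
    | _ => (-1, -1, -1)  -- unreachable from dfs_alt
  termination_by K _ => (K.map pvWeight).sum
  decreasing_by
  · exact pvDec_leaf l r h K
  · exact pvDec_split l r hlt K
  · exact pvDec_combine K

def dfs_alt (ls : List Int) (l : Int) (r : Int) : Int × Int × Int :=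
  pvRun ls [PVItem.task l r] []

-- ===== PRECONDITION & SPEC =====
-- Pre_dfs excludes only inputs on which Python A raises: an index among l..r outside the
-- list (IndexError), and segments whose length r-l+1 is not a power of two ≥ 2, on which
-- A's mid-split recursion reaches an l = r segment and descends forever (RecursionError).
def Pre_dfs (ls : List Int) (l : Int) (r : Int) : Prop :=
  -(ls.length : Int) ≤ l ∧ r < ls.length ∧ l < r ∧
  (r - l).toNat + 1 = 2 ^ Nat.log2 ((r - l).toNat + 1)
instance (ls : List Int) (l : Int) (r : Int) : Decidable (Pre_dfs ls l r) := by
  unfold Pre_dfs; infer_instance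

def pvWitness_dfs : List Int × Int × Int := ([3, 1, 2, 4], 0, 3)

def Spec_dfs (ls : List Int) (l : Int) (r : Int) (out : Int × Int × Int) : Prop := out = dfs_alt ls l r
instance (ls : List Int) (l : Int) (r : Int) (out : Int × Int × Int) : Decidable (Spec_dfs ls l r out) := by unfold Spec_dfs; infer_instance

-- ===== CLAIM (what is proved, stated in full; the proofs are below) =====
def Claim_equal_dfs : Prop := ∀ (ls : List Int) (l : Int) (r : Int), Dom_dfs ls l r → Pre_dfs ls l r → Spec_dfs ls l r (dfs ls l r)

-- ===== LEMMAS AND PROOFS =====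

-- reference value of a full (power-of-two) segment tree of height k+1, structural on k
def pvVal (ls : List Int) : Nat → Int → Int → Int × Int × Int
  | 0, l, r =>
    (fun x y => if x < y then (0, x, y) else (1, y, x))
      ((PySem.List.pyGet? ls l).getD 0) ((PySem.List.pyGet? ls r).getD 0)
  | k+1, l, r =>
    let m := PySem.Int.floordiv (l + r) 2
    pvCombine (pvVal ls k l m) (pvVal ls k (m+1) r)

lemma pvMid (l r : Int) (k : Nat) (hk : r - l + 1 = 2 ^ (k + 1 + 1)) :
    PySem.Int.floordiv (l + r) 2 = l + 2 ^ (k + 1) - 1 := by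
  have hm := PySem.Int.floordiv_eq_ediv_of_pos (a := l + r) (b := 2) (by
    have h1 : (1:Int) ≤ 2 ^ (k+1+1) := one_le_pow₀ (by omega)
    omega)
  have h2 : (2:Int) ^ (k + 1 + 1) = 2 * 2 ^ (k + 1) := by ring
  rw [hm]; omega

lemma dfsAux_val (ls : List Int) : ∀ (k : Nat) (l r : Int) (f : Nat),
    r - l + 1 = 2 ^ (k + 1) → -(ls.length : Int) ≤ l → r < ls.length → k + 1 ≤ f →
    dfsAux ls f l r = some (pvVal ls k l r) := by
  intro k
  induction k with
  | zero =>
    intro l r f hk hl hr hf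
    obtain ⟨g, rfl⟩ : ∃ g, f = g + 1 := ⟨f - 1, by omega⟩
    have hb : l + 1 = r := by omega
    have hxl : PySem.List.pyGet? ls l ≠ none := fun h =>
      ((PySem.List.pyGet?_eq_none_iff ls l).mp h) ⟨by omega, by omega⟩
    have hxr : PySem.List.pyGet? ls r ≠ none := fun h =>
      ((PySem.List.pyGet?_eq_none_iff ls r).mp h) ⟨by omega, by omega⟩
    obtain ⟨x, hx⟩ := Option.ne_none_iff_exists'.mp hxl
    obtain ⟨y, hy⟩ := Option.ne_none_iff_exists'.mp hxr
    simp only [dfsAux, if_pos hb, hx, hy, pvVal, Option.getD_some]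
  | succ k ih =>
    intro l r f hk hl hr hf
    obtain ⟨g, rfl⟩ : ∃ g, f = g + 1 := ⟨f - 1, by omega⟩
    have h1 : (1:Int) ≤ 2 ^ (k+1) := one_le_pow₀ (by omega)
    have h2 : (2:Int) ^ (k + 1 + 1) = 2 * 2 ^ (k + 1) := by ring
    have hb : l + 1 ≠ r := by omega
    have hm := pvMid l r k hk
    have e1 := ih l (PySem.Int.floordiv (l + r) 2) g (by omega) hl (by omega) (by omega)
    have e2 := ih (PySem.Int.floordiv (l + r) 2 + 1) r g (by omega) (by omega) hr (by omega)
    simp only [dfsAux, if_neg hb, e1, e2, pvVal, pvCombine]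

lemma run_task (ls : List Int) : ∀ (k : Nat) (l r : Int),
    r - l + 1 = 2 ^ (k + 1) →
    ∀ (K : List PVItem) (res : List (Int × Int × Int)),
    pvRun ls (PVItem.task l r :: K) res = pvRun ls K (pvVal ls k l r :: res) := by
  intro k
  induction k with
  | zero =>
    intro l r hk K res
    have hb : l + 1 = r := by omega
    rw [pvRun, dif_pos hb]
    simp only [pvVal]
  | succ k ih =>
    intro l r hk K res
    have h1 : (1:Int) ≤ 2 ^ (k+1) := one_le_pow₀ (by omega)
    have h2 : (2:Int) ^ (k + 1 + 1) = 2 * 2 ^ (k + 1) := by ring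
    have hb : l + 1 ≠ r := by omega
    have hlr : l < r := by omega
    have hm := pvMid l r k hk
    rw [pvRun, dif_neg hb, dif_pos hlr]
    rw [ih l (PySem.Int.floordiv (l + r) 2) (by omega),
        ih (PySem.Int.floordiv (l + r) 2 + 1) r (by omega)]
    rw [pvRun]
    simp only [pvVal]

-- ===== VERDICT (by name: the statement is the Claim_ definition above) =====
theorem dfs_spec : Claim_equal_dfs := by
  intro ls l r hdom hpre
  obtain ⟨hl, hr, hlr, hk⟩ := hpre
  obtain ⟨k, hK⟩ : ∃ k, Nat.log2 ((r - l).toNat + 1) = k + 1 := by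
    refine ⟨Nat.log2 ((r - l).toNat + 1) - 1, ?_⟩
    rcases Nat.eq_zero_or_pos (Nat.log2 ((r - l).toNat + 1)) with h0 | h0
    · rw [h0] at hk; simp at hk; omega
    · omega
  rw [hK] at hk
  -- Dom bounds the segment length: 2^(k+1) = r-l+1 ≤ 2^32+1, so k+1 ≤ 32 < 64
  have hdomb : -2147483648 ≤ l ∧ r ≤ 2147483648 := by
    simp only [Dom_dfs, Bool.and_eq_true, pvDomInt, decide_eq_true_eq] at hdom
    exact ⟨hdom.1.2.1, hdom.2.2⟩
  have hsmall : k + 1 ≤ 32 := by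
    by_contra hbig
    have h33 : 2 ^ 33 ≤ 2 ^ (k + 1) := Nat.pow_le_pow_right (by omega) (by omega)
    omega
  have hki : r - l + 1 = ((2 ^ (k + 1) : Nat) : Int) := by rw [← hk]; omega
  have hkc : ((2 ^ (k + 1) : Nat) : Int) = (2 : Int) ^ (k + 1) := by push_cast; rfl
  have hint : r - l + 1 = (2 : Int) ^ (k + 1) := by rw [hki, hkc]
  unfold Spec_dfs dfs_alt dfs
  rw [dfsAux_val ls k l r 64 hint hl hr (by omega),
      run_task ls k l r hint [] []]
  simp [pvRun]
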